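-- pv_equiv track=rewrite | github.com/psaikko/pyBook | booklet.py | leaf_order
-- ===== SOURCE A (Python) =====
-- import math # ceil
-- import collections # deque
--
-- def leaf_order(n_leaves, section_size):
--     """Compute leaf order for booklet printing."""
--
--     n_sections = math.ceil(n_leaves / (section_size * 4))
--     leaves = list(range(1, 1 + n_sections * section_size * 4))
--
--     out_order = []
--
--     for _ in range(n_sections):
--         section_order = []
--         section_leaves, leaves = collections.deque(leaves[:section_size*4]), leaves[section_size*4:]
--         for _ in range(section_size):
--             outside_left = section_leaves.pop()
--             outside_right = section_leaves.popleft()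
--             inside_left = section_leaves.popleft()
--             inside_right = section_leaves.pop()
--
--             section_order = [inside_left, inside_right, outside_left, outside_right] + section_order
--         out_order += section_order
--
--     return out_order
-- ===== SOURCE B (Python) =====
-- def leaf_order(n_leaves, section_size):
--     """Compute leaf order for booklet printing (direct index formula, one pass)."""
--     s = section_size
--     n_sections = -((-n_leaves) // (4 * s))
--     out = []
--     for sec in range(n_sections):
--         m = 4 * s * sec + 2 * s
--         for j in range(s):
--             out.extend((m - 2 * j, m + 2 * j + 1, m + 2 * j + 2, m - 2 * j - 1))
--     return out
-- ===== Notes on version B (the rewrite author's own statement) =====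
-- stated objective: faster
-- what changed: B replaces A's per-section deque simulation with repeated slicing and list prepending (section_order = [...] + section_order) by a closed-form index formula that emits the four leaves of each sheet directly in one pass.
import Mathlib
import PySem

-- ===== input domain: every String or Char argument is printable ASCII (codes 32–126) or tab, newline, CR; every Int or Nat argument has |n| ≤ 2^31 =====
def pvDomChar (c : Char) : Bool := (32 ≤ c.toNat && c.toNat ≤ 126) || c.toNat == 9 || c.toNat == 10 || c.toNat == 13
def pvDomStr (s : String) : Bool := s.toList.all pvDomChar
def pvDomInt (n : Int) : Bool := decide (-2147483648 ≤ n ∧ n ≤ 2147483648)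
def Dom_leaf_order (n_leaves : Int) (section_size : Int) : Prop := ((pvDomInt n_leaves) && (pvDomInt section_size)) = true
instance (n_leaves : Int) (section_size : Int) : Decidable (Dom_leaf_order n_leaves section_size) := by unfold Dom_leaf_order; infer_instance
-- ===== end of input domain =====

-- B replaces A's per-section deque simulation and list prepending by a direct
-- index formula emitted in one pass (objective: faster).

-- ===== PORT A =====
-- one iteration of A's inner loop: four deque pops and a prepend.
-- '.getD 0' stands where Python's deque pop would raise IndexError on an empty
-- deque; that state is unreachable for any input A returns on (sections have
-- exactly 4*section_size leaves).
def pvStepA (st : List Int × List Int) : List Int × List Int :=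
  let outside_left := st.2.getLast?.getD 0      -- section_leaves.pop()
  let d1 := st.2.dropLast
  let outside_right := d1.head?.getD 0          -- section_leaves.popleft()
  let d2 := d1.tail
  let inside_left := d2.head?.getD 0            -- section_leaves.popleft()
  let d3 := d2.tail
  let inside_right := d3.getLast?.getD 0        -- section_leaves.pop()
  let d4 := d3.dropLast
  ([inside_left, inside_right, outside_left, outside_right] ++ st.1, d4)

-- body of A's outer loop over sections (state = (out_order, leaves))
def pvSectionA (section_size : Int) (st : List Int × List Int) : List Int × List Int :=
  let section_leaves := PySem.List.slice st.2 none (some (section_size * 4))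
  let leaves := PySem.List.slice st.2 (some (section_size * 4)) none
  let sec := (PySem.List.pyRange 0 section_size 1).foldl (fun st2 _ => pvStepA st2) ([], section_leaves)
  (st.1 ++ sec.1, leaves)

def leaf_order (n_leaves : Int) (section_size : Int) : List Int :=
  -- math.ceil(n_leaves / (section_size * 4)): ported as the exact ceiling
  -- -((-n) // d); exact on Dom (|n| ≤ 2^31 keeps the float quotient from
  -- rounding across an integer)
  let n_sections := -(PySem.Int.floordiv (-n_leaves) (section_size * 4))
  let leaves := PySem.List.pyRange 1 (1 + n_sections * section_size * 4) 1
  let r := (PySem.List.pyRange 0 n_sections 1).foldl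
    (fun st _ => pvSectionA section_size st) ([], leaves)
  r.1

-- ===== PORT B =====
def leaf_order_alt (n_leaves : Int) (section_size : Int) : List Int :=
  let s := section_size
  let n_sections := -(PySem.Int.floordiv (-n_leaves) (4 * s))
  (PySem.List.pyRange 0 n_sections 1).foldl
    (fun out sec =>
      let m := 4 * s * sec + 2 * s
      (PySem.List.pyRange 0 s 1).foldl
        (fun out j => out ++ [m - 2 * j, m + 2 * j + 1, m + 2 * j + 2, m - 2 * j - 1]) out)
    []

-- ===== PRECONDITION & SPEC =====
-- Pre_ excludes exactly section_size = 0, where A raises ZeroDivisionError.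
def Pre_leaf_order (_n_leaves : Int) (section_size : Int) : Prop := section_size ≠ 0
instance (n_leaves : Int) (section_size : Int) : Decidable (Pre_leaf_order n_leaves section_size) := by unfold Pre_leaf_order; infer_instance
def pvWitness_leaf_order : Int × Int := (8, 1)

def Spec_leaf_order (n_leaves : Int) (section_size : Int) (out : List Int) : Prop := out = leaf_order_alt n_leaves section_size
instance (n_leaves : Int) (section_size : Int) (out : List Int) : Decidable (Spec_leaf_order n_leaves section_size out) := by unfold Spec_leaf_order; infer_instance

-- ===== CLAIM (what is proved, stated in full; the proofs are below) =====
def Claim_equal_leaf_order : Prop := ∀ (n_leaves : Int) (section_size : Int), Dom_leaf_order n_leaves section_size → Pre_leaf_order n_leaves section_size → Spec_leaf_order n_leaves section_size (leaf_order n_leaves section_size)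

-- ===== LEMMAS AND PROOFS =====

-- iterate a function n times (a fold that ignores its list elements)
def pvIter {α : Type} : Nat → (α → α) → α → α
  | 0, _, x => x
  | n+1, f, x => pvIter n f (f x)

theorem pvFoldl_const {α β : Type} (f : α → α) (l : List β) (x : α) :
    List.foldl (fun a _ => f a) x l = pvIter l.length f x := by
  induction l generalizing x with
  | nil => rfl
  | cons h t ih => simp [pvIter, ih]

-- the run [lo, lo+1, …, lo+m-1]
def pvSeq (lo : Int) : Nat → List Int
  | 0 => []
  | m+1 => lo :: pvSeq (lo+1) m

theorem pvSeq_eq_pyRange (lo : Int) (m : Nat) :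
    pvSeq lo m = PySem.List.pyRange lo (lo + m) 1 := by
  induction m generalizing lo with
  | zero => simp [pvSeq, PySem.List.pyRange_one_eq_nil]
  | succ m ih =>
    rw [PySem.List.pyRange_one_cons (by push_cast; omega)]
    simp only [pvSeq]
    rw [ih (lo+1)]
    have h : lo + 1 + (m : Int) = lo + ((m+1 : Nat) : Int) := by push_cast; ring
    rw [h]

theorem pvSeq_snoc (lo : Int) (m : Nat) : pvSeq lo (m+1) = pvSeq lo m ++ [lo + m] := by
  induction m generalizing lo with
  | zero => simp [pvSeq]
  | succ m ih =>
    have h : lo + 1 + (m : Int) = lo + ((m+1 : Nat) : Int) := by push_cast; ring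
    calc pvSeq lo (m+1+1) = lo :: pvSeq (lo+1) (m+1) := rfl
    _ = lo :: (pvSeq (lo+1) m ++ [lo + 1 + (m : Int)]) := by rw [ih (lo+1)]
    _ = pvSeq lo (m+1) ++ [lo + ((m+1 : Nat) : Int)] := by rw [h]; rfl

theorem pvSeq_append (lo : Int) (m k : Nat) :
    pvSeq lo (m + k) = pvSeq lo m ++ pvSeq (lo + m) k := by
  induction m generalizing lo with
  | zero => simp [pvSeq]
  | succ m ih =>
    have hn : m + 1 + k = (m + k) + 1 := by omega
    have h : lo + 1 + (m : Int) = lo + ((m+1 : Nat) : Int) := by push_cast; ring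
    calc pvSeq lo (m+1+k) = lo :: pvSeq (lo+1) (m+k) := by rw [hn]; rfl
    _ = lo :: (pvSeq (lo+1) m ++ pvSeq (lo+1+(m : Int)) k) := by rw [ih (lo+1)]
    _ = pvSeq lo (m+1) ++ pvSeq (lo + ((m+1 : Nat) : Int)) k := by rw [h]; rfl

theorem pvSeq_length (lo : Int) (m : Nat) : (pvSeq lo m).length = m := by
  induction m generalizing lo with
  | zero => rfl
  | succ m ih => simp [pvSeq, ih]

-- one pvStepA step on a run of length 4t+4
theorem pvStepA_seq (t : Nat) (lo : Int) (acc : List Int) :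
    pvStepA (acc, pvSeq lo (4*t+4))
      = ([lo+1, lo+4*t+2, lo+4*t+3, lo] ++ acc, pvSeq (lo+2) (4*t)) := by
  have h1 : pvSeq lo (4*t+4) = pvSeq lo (4*t+3) ++ [lo + ((4*t+3 : Nat) : Int)] := pvSeq_snoc lo _
  have h2 : pvSeq lo (4*t+3) = lo :: pvSeq (lo+1) (4*t+2) := by
    rw [show 4*t+3 = (4*t+2)+1 by omega]; rfl
  have h3 : pvSeq (lo+1) (4*t+2) = (lo+1) :: pvSeq (lo+2) (4*t+1) := by
    rw [show 4*t+2 = (4*t+1)+1 by omega, show (lo+2) = (lo+1)+1 by ring]; rfl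
  have h4 : pvSeq (lo+2) (4*t+1) = pvSeq (lo+2) (4*t) ++ [(lo+2) + ((4*t : Nat) : Int)] :=
    pvSeq_snoc _ _
  simp only [pvStepA, h1, h2, h3, h4]
  simp only [List.getLast?_concat, Option.getD_some, List.dropLast_concat,
    List.head?_cons, List.tail_cons]
  rw [show lo + 2 + ((4*t : Nat) : Int) = lo + 4*t + 2 by push_cast; ring,
      show lo + ((4*t+3 : Nat) : Int) = lo + 4*t + 3 by push_cast; ring]

-- the leaf order of one section of 2t sheets starting at leaf lo
def pvSecL (t : Nat) (lo : Int) : List Int :=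
  (List.range t).flatMap (fun (j : Nat) =>
    [lo + 2*(t : Int) - 2*(j : Int) - 1, lo + 2*(t : Int) + 2*(j : Int),
     lo + 2*(t : Int) + 2*(j : Int) + 1, lo + 2*(t : Int) - 2*(j : Int) - 2])

theorem pvSecL_succ (t : Nat) (lo : Int) :
    pvSecL (t+1) lo = pvSecL t (lo+2) ++ [lo+1, lo+4*t+2, lo+4*t+3, lo] := by
  unfold pvSecL
  rw [List.range_succ, List.flatMap_append]
  congr 1
  · apply List.flatMap_congr
    intro j hj
    push_cast
    simp only [List.cons.injEq, and_true]
    exact ⟨by ring, by ring, by ring, by ring⟩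
  · simp only [List.flatMap_cons, List.flatMap_nil, List.append_nil]
    push_cast
    simp only [List.cons.injEq, and_true]
    exact ⟨by ring, by ring, by ring, by ring⟩

-- the inner loop consumes the whole run and produces the section order
theorem pvInner (t : Nat) (lo : Int) (acc : List Int) :
    pvIter t pvStepA (acc, pvSeq lo (4*t)) = (pvSecL t lo ++ acc, []) := by
  induction t generalizing lo acc with
  | zero => simp [pvIter, pvSecL]; rfl
  | succ t ih =>
    rw [show 4*(t+1) = 4*t+4 by omega]
    show pvIter t pvStepA (pvStepA (acc, pvSeq lo (4*t+4))) = _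
    rw [pvStepA_seq, ih (lo+2)]
    rw [pvSecL_succ]
    simp [List.append_assoc]

-- concatenation of all section orders
def pvOutL (c t : Nat) (lo : Int) : List Int :=
  (List.range c).flatMap (fun (sec : Nat) => pvSecL t (lo + 4*(t : Int)*(sec : Int)))

theorem pvOutL_succ (c t : Nat) (lo : Int) :
    pvOutL (c+1) t lo = pvSecL t lo ++ pvOutL c t (lo + 4*(t : Int)) := by
  unfold pvOutL
  rw [List.range_succ_eq_map, List.flatMap_cons, List.flatMap_map]
  congr 1
  · congr 1; push_cast; ring
  · apply List.flatMap_congr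
    intro sec hsec
    congr 1
    push_cast; ring

-- A's outer loop on a positive section size
theorem pvOuter (t c : Nat) (lo : Int) (acc : List Int) :
    pvIter c (pvSectionA (t : Int)) (acc, pvSeq lo (4*t*c)) = (acc ++ pvOutL c t lo, []) := by
  induction c generalizing lo acc with
  | zero => simp [pvIter, pvOutL]; rfl
  | succ c ih =>
    show pvIter c _ (pvSectionA (t : Int) (acc, pvSeq lo (4*t*(c+1)))) = _
    have hsplit : pvSeq lo (4*t*(c+1)) = pvSeq lo (4*t) ++ pvSeq (lo + ((4*t : Nat) : Int)) (4*t*c) := by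
      rw [show 4*t*(c+1) = 4*t + 4*t*c by ring]
      exact pvSeq_append lo (4*t) (4*t*c)
    have hstep : pvSectionA (t : Int) (acc, pvSeq lo (4*t*(c+1)))
        = (acc ++ pvSecL t lo, pvSeq (lo + ((4*t : Nat) : Int)) (4*t*c)) := by
      unfold pvSectionA
      have hc : ((t : Int) * 4) = ((4*t : Nat) : Int) := by push_cast; ring
      rw [hsplit]
      simp only [hc, PySem.List.slice_to_natCast, PySem.List.slice_from_natCast,
        List.take_left' (pvSeq_length lo (4*t)), List.drop_left' (pvSeq_length lo (4*t))]
      rw [pvFoldl_const, PySem.List.length_pyRange_one]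
      rw [show ((t : Int) - 0).toNat = t by omega, pvInner t lo []]
      simp
    rw [hstep, ih]
    rw [pvOutL_succ]
    rw [show lo + ((4*t : Nat) : Int) = lo + 4*(t : Int) by push_cast; ring]
    simp [List.append_assoc]

-- folds whose step keeps the first component fixed
theorem pvFoldl_fst {α β γ : Type} (F : (List α × β) → γ → (List α × β))
    (h : ∀ st e, (F st e).1 = st.1) (l : List γ) (st : List α × β) :
    (List.foldl F st l).1 = st.1 := by
  induction l generalizing st with
  | nil => rfl
  | cons x xs ih => rw [List.foldl_cons, ih, h]

-- B unfolded to a double flatMap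
theorem pvAlt_eq (n_leaves section_size : Int) :
    leaf_order_alt n_leaves section_size
      = (PySem.List.pyRange 0 (-(PySem.Int.floordiv (-n_leaves) (4 * section_size))) 1).flatMap
          (fun sec => (PySem.List.pyRange 0 section_size 1).flatMap (fun j =>
            [4*section_size*sec + 2*section_size - 2*j,
             4*section_size*sec + 2*section_size + 2*j + 1,
             4*section_size*sec + 2*section_size + 2*j + 2,
             4*section_size*sec + 2*section_size - 2*j - 1])) := by
  unfold leaf_order_alt
  simp only [PySem.List.foldl_append_eq_flatMap, List.nil_append]

-- main equivalence
theorem pvMain (n s : Int) (hs : s ≠ 0) : leaf_order n s = leaf_order_alt n s := by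
  rw [pvAlt_eq, show (4*s) = s*4 by ring]
  rcases lt_or_gt_of_ne hs with hneg | hpos
  · -- s < 0: both sides are []
    have hr : PySem.List.pyRange 0 s 1 = [] := PySem.List.pyRange_one_eq_nil (by omega)
    have h1 : ∀ (st : List Int × List Int) (e : Int), ((fun st (_ : Int) => pvSectionA s st) st e).1 = st.1 := by
      intro st e
      simp only [pvSectionA, hr, List.foldl_nil, List.append_nil]
    have hA : leaf_order n s = [] :=
      pvFoldl_fst (fun st (_ : Int) => pvSectionA s st) h1
        (PySem.List.pyRange 0 (-(PySem.Int.floordiv (-n) (s*4))) 1)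
        ([], PySem.List.pyRange 1 (1 + -(PySem.Int.floordiv (-n) (s*4)) * s * 4) 1)
    rw [hA]
    simp [hr]
  · -- s > 0
    obtain ⟨t, rfl⟩ : ∃ t : Nat, s = (t : Int) := ⟨s.toNat, (Int.toNat_of_nonneg hpos.le).symm⟩
    by_cases hc : -(PySem.Int.floordiv (-n) ((t : Int)*4)) ≤ 0
    · -- no sections: both sides []
      have hr : PySem.List.pyRange 0 (-(PySem.Int.floordiv (-n) ((t : Int)*4))) 1 = [] :=
        PySem.List.pyRange_one_eq_nil (by omega)
      have hA : leaf_order n (t : Int) = [] := by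
        simp only [leaf_order]
        rw [hr]
        rfl
      rw [hA, hr]
      simp
    · obtain ⟨c, hcc⟩ : ∃ c : Nat, -(PySem.Int.floordiv (-n) ((t : Int)*4)) = (c : Int) :=
        ⟨(-(PySem.Int.floordiv (-n) ((t : Int)*4))).toNat, (Int.toNat_of_nonneg (by omega)).symm⟩
      -- A's leaves list is the run 1 .. 4*t*c
      have hleaves : PySem.List.pyRange 1 (1 + -(PySem.Int.floordiv (-n) ((t : Int)*4)) * (t : Int) * 4) 1
          = pvSeq 1 (4*t*c) := by
        rw [pvSeq_eq_pyRange]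
        congr 1
        rw [hcc]; push_cast; ring
      have hA : leaf_order n (t : Int) = pvOutL c t 1 := by
        simp only [leaf_order]
        rw [hleaves, pvFoldl_const (pvSectionA (t : Int)), PySem.List.length_pyRange_one,
          show (-(PySem.Int.floordiv (-n) ((t : Int)*4)) - 0).toNat = c by omega]
        rw [pvOuter t c 1 []]
        simp
      rw [hA, hcc, PySem.List.pyRange_zero_natCast c, List.flatMap_map]
      unfold pvOutL
      apply List.flatMap_congr
      intro sec hsec
      rw [PySem.List.pyRange_zero_natCast t, List.flatMap_map]
      unfold pvSecL
      apply List.flatMap_congr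
      intro j hj
      simp only [List.cons.injEq, and_true]
      exact ⟨by ring, by ring, by ring, by ring⟩

-- ===== VERDICT (by name: the statement is the Claim_ definition above) =====
theorem leaf_order_spec : Claim_equal_leaf_order := by
  intro n s _ hs
  unfold Spec_leaf_order
  exact pvMain n s hs
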